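-- pv_equiv track=rewrite | github.com/Dimitri-Limberopoulos/womens-jeans-dashboard | prep_data.py | color_to_wash_category
-- ===== SOURCE A (Python) =====
-- def color_to_wash_category(color_str):
--     """Map 500+ color values to wash categories"""
--     if not color_str:
--         return None  # will be excluded from charts (no data)
--
--     color_str = str(color_str).lower().strip()
--     if not color_str or color_str == 'none':
--         return None
--
--     # Black
--     if 'black' in color_str:
--         return 'Black'
--
--     # White/Cream
--     if any(x in color_str for x in ['white', 'cream', 'ivory', 'off-white']):
--         return 'White/Cream'
--
--     # Grey
--     if any(x in color_str for x in ['grey', 'gray', 'charcoal', 'gunmetal', 'steel']):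
--         return 'Grey'
--
--     # Dark Wash
--     if any(x in color_str for x in ['dark', 'indigo', 'rinse', 'deep', 'midnight',
--                                       'navy', 'heritage']):
--         return 'Dark Wash'
--
--     # Light Wash
--     if any(x in color_str for x in ['light', 'bleach', 'faded', 'acid']):
--         return 'Light Wash'
--
--     # Medium Wash (mid, stonewash, plain "blue", "denim", "wash")
--     if any(x in color_str for x in ['medium', 'stonewash', 'mid wash', 'mid-wash']):
--         return 'Medium Wash'
--
--     # Plain "blue" or "denim" without other qualifiers = Medium Wash
--     if color_str in ('blue', 'denim', 'denim blue', 'blue denim'):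
--         return 'Medium Wash'
--
--     # Brown/Tan tones
--     if any(x in color_str for x in ['brown', 'chocolate', 'toffee', 'bourbon',
--                                       'tan', 'camel', 'cognac', 'coffee']):
--         return 'Brown/Tan'
--
--     # Khaki/Olive/Earth
--     if any(x in color_str for x in ['khaki', 'olive', 'pine', 'sage', 'moss',
--                                       'army', 'camo', 'sand', 'stone', 'natural']):
--         return 'Earth Tones'
--
--     # Everything else is truly a non-denim color
--     return 'Color'
-- ===== SOURCE B (Python) =====
-- # B: instead of an ordered first-match branch chain, score the string against a flat
-- # keyword->priority index, keep the MINIMUM priority that fires, and map it to its category.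
-- _KEYWORDS = (
--     [('black', 0)]
--     + [(k, 1) for k in ('white', 'cream', 'ivory', 'off-white')]
--     + [(k, 2) for k in ('grey', 'gray', 'charcoal', 'gunmetal', 'steel')]
--     + [(k, 3) for k in ('dark', 'indigo', 'rinse', 'deep', 'midnight', 'navy', 'heritage')]
--     + [(k, 4) for k in ('light', 'bleach', 'faded', 'acid')]
--     + [(k, 5) for k in ('medium', 'stonewash', 'mid wash', 'mid-wash')]
--     + [(k, 7) for k in ('brown', 'chocolate', 'toffee', 'bourbon', 'tan', 'camel', 'cognac', 'coffee')]
--     + [(k, 8) for k in ('khaki', 'olive', 'pine', 'sage', 'moss', 'army', 'camo', 'sand', 'stone', 'natural')]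
-- )
-- _EXACT = ('blue', 'denim', 'denim blue', 'blue denim')  # whole-string rule, priority 6
-- _CATS = ['Black', 'White/Cream', 'Grey', 'Dark Wash', 'Light Wash',
--          'Medium Wash', 'Medium Wash', 'Brown/Tan', 'Earth Tones']
--
-- def color_to_wash_category(color_str):
--     if not color_str:
--         return None
--     s = str(color_str).lower().strip()
--     if not s or s == 'none':
--         return None
--     best = len(_CATS)  # 9 = no rule fired
--     for kw, p in _KEYWORDS:
--         if p < best and kw in s:
--             best = p
--     if s in _EXACT:
--         best = min(best, 6)
--     return _CATS[best] if best < len(_CATS) else 'Color'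
-- ===== Notes on version B (the rewrite author's own statement) =====
-- stated objective: alternative
-- what changed: Replaced A's ordered first-match branch chain by a flat keyword-to-priority index scored with a running minimum-priority accumulator, the whole-string rule folded in as priority 6, and a final priority-to-category table lookup.
import Mathlib
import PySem

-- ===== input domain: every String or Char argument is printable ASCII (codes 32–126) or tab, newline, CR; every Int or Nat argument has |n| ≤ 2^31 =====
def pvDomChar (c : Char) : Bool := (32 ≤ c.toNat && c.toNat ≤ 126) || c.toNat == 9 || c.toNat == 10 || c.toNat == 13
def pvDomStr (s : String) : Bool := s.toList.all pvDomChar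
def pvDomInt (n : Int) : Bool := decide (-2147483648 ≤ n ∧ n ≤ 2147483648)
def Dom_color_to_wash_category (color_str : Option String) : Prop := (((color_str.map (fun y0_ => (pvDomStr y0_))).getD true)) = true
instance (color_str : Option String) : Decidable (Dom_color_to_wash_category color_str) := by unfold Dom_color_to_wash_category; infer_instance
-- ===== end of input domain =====

-- B replaces A's ordered first-match branch chain by a flat keyword->priority index scored with a running minimum, plus a priority->category table (alternative decomposition, same cost).


-- ===== PORT A =====
-- Literal transliteration: the unrolled chain of keyword checks, in A's order.
def color_to_wash_category (color_str : Option String) : Option String :=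
  match color_str with
  | none => none
  | some s0 =>
    if s0 = "" then none else
    let s := PySem.Str.strip (PySem.Str.lower s0)
    if s = "" || s = "none" then none
    else if PySem.Str.isIn "black" s then some "Black"
    else if ["white", "cream", "ivory", "off-white"].any (fun x => PySem.Str.isIn x s) then some "White/Cream"
    else if ["grey", "gray", "charcoal", "gunmetal", "steel"].any (fun x => PySem.Str.isIn x s) then some "Grey"
    else if ["dark", "indigo", "rinse", "deep", "midnight", "navy", "heritage"].any (fun x => PySem.Str.isIn x s) then some "Dark Wash"
    else if ["light", "bleach", "faded", "acid"].any (fun x => PySem.Str.isIn x s) then some "Light Wash"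
    else if ["medium", "stonewash", "mid wash", "mid-wash"].any (fun x => PySem.Str.isIn x s) then some "Medium Wash"
    else if s = "blue" || s = "denim" || s = "denim blue" || s = "blue denim" then some "Medium Wash"
    else if ["brown", "chocolate", "toffee", "bourbon", "tan", "camel", "cognac", "coffee"].any (fun x => PySem.Str.isIn x s) then some "Brown/Tan"
    else if ["khaki", "olive", "pine", "sage", "moss", "army", "camo", "sand", "stone", "natural"].any (fun x => PySem.Str.isIn x s) then some "Earth Tones"
    else some "Color"

-- ===== PORT B =====
-- B: flat keyword->priority index; keep the minimum priority that fires; priority 6 is the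
-- whole-string rule; a final table lookup maps the best priority to its category.
def pvKeywords : List (String × Nat) :=
  [("black", 0)]
  ++ ["white", "cream", "ivory", "off-white"].map (fun k => (k, 1))
  ++ ["grey", "gray", "charcoal", "gunmetal", "steel"].map (fun k => (k, 2))
  ++ ["dark", "indigo", "rinse", "deep", "midnight", "navy", "heritage"].map (fun k => (k, 3))
  ++ ["light", "bleach", "faded", "acid"].map (fun k => (k, 4))
  ++ ["medium", "stonewash", "mid wash", "mid-wash"].map (fun k => (k, 5))
  ++ ["brown", "chocolate", "toffee", "bourbon", "tan", "camel", "cognac", "coffee"].map (fun k => (k, 7))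
  ++ ["khaki", "olive", "pine", "sage", "moss", "army", "camo", "sand", "stone", "natural"].map (fun k => (k, 8))

def pvCats : List String :=
  ["Black", "White/Cream", "Grey", "Dark Wash", "Light Wash", "Medium Wash", "Medium Wash", "Brown/Tan", "Earth Tones"]

def color_to_wash_category_alt (color_str : Option String) : Option String :=
  match color_str with
  | none => none
  | some s0 =>
    if s0 = "" then none else
    let s := PySem.Str.strip (PySem.Str.lower s0)
    if s = "" || s = "none" then none
    else
      let best := pvKeywords.foldl
        (fun b kp => if kp.2 < b && PySem.Str.isIn kp.1 s then kp.2 else b) pvCats.length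
      let best := if ["blue", "denim", "denim blue", "blue denim"].contains s then min best 6 else best
      some (if best < pvCats.length then pvCats.getD best "Color" else "Color")

-- ===== PRECONDITION & SPEC =====
def Spec_color_to_wash_category (color_str : Option String) (out : Option String) : Prop := out = color_to_wash_category_alt color_str
instance (color_str : Option String) (out : Option String) : Decidable (Spec_color_to_wash_category color_str out) := by unfold Spec_color_to_wash_category; infer_instance

-- ===== CLAIM (what is proved, stated in full; the proofs are below) =====
def Claim_equal_color_to_wash_category : Prop := ∀ (color_str : Option String), Dom_color_to_wash_category color_str → Spec_color_to_wash_category color_str (color_to_wash_category color_str)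

-- ===== LEMMAS AND PROOFS =====

-- One same-priority keyword group folds to "if the group fires and can improve, its priority".
theorem pvGroup_fold (s : String) (kws : List String) (p b : Nat) :
    (kws.map (fun k => (k, p))).foldl
      (fun b kp => if kp.2 < b && PySem.Str.isIn kp.1 s then kp.2 else b) b
    = if p < b && kws.any (fun k => PySem.Str.isIn k s) then p else b := by
  induction kws generalizing b with
  | nil => simp
  | cons k rest ih =>
    simp only [List.map_cons, List.foldl_cons, List.any_cons, ih]
    by_cases hk : PySem.Str.isIn k s = true
    · simp only [hk]
      by_cases hp : p < b <;> simp [hp]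
    · rw [Bool.not_eq_true] at hk
      simp only [hk]
      by_cases hp : p < b <;> simp [hp]

-- min-form of the group fold: the accumulator appears only once (keeps terms linear).
theorem pvGroup_fold' (s : String) (kws : List String) (p b : Nat) (hb : b ≤ 9) :
    (kws.map (fun k => (k, p))).foldl
      (fun b kp => if kp.2 < b && PySem.Str.isIn kp.1 s then kp.2 else b) b
    = min b (if kws.any (fun k => PySem.Str.isIn k s) then p else 9) := by
  rw [pvGroup_fold]
  cases h : kws.any (fun k => PySem.Str.isIn k s) <;> simp <;> (try split) <;> omega

theorem pvMinIf_le (x p : Nat) (c : Bool) (hx : x ≤ 9) :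
    min x (if c then p else 9) ≤ 9 := by
  cases c <;> simp <;> omega

set_option maxHeartbeats 1000000 in
theorem pvMin_eq_chain (s : String) :
    (let best := pvKeywords.foldl
        (fun b kp => if kp.2 < b && PySem.Str.isIn kp.1 s then kp.2 else b) pvCats.length
     let best := if ["blue", "denim", "denim blue", "blue denim"].contains s then min best 6 else best
     some (if best < pvCats.length then pvCats.getD best "Color" else "Color"))
    = (if PySem.Str.isIn "black" s then some "Black"
    else if ["white", "cream", "ivory", "off-white"].any (fun x => PySem.Str.isIn x s) then some "White/Cream"
    else if ["grey", "gray", "charcoal", "gunmetal", "steel"].any (fun x => PySem.Str.isIn x s) then some "Grey"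
    else if ["dark", "indigo", "rinse", "deep", "midnight", "navy", "heritage"].any (fun x => PySem.Str.isIn x s) then some "Dark Wash"
    else if ["light", "bleach", "faded", "acid"].any (fun x => PySem.Str.isIn x s) then some "Light Wash"
    else if ["medium", "stonewash", "mid wash", "mid-wash"].any (fun x => PySem.Str.isIn x s) then some "Medium Wash"
    else if s = "blue" || s = "denim" || s = "denim blue" || s = "blue denim" then some "Medium Wash"
    else if ["brown", "chocolate", "toffee", "bourbon", "tan", "camel", "cognac", "coffee"].any (fun x => PySem.Str.isIn x s) then some "Brown/Tan"
    else if ["khaki", "olive", "pine", "sage", "moss", "army", "camo", "sand", "stone", "natural"].any (fun x => PySem.Str.isIn x s) then some "Earth Tones"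
    else some "Color") := by
  have hsingle : [("black", (0 : Nat))] = ["black"].map (fun k => (k, 0)) := rfl
  have h0' : (["black"].any (fun x => PySem.Str.isIn x s)) = PySem.Str.isIn "black" s := by
    simp only [List.any_cons, List.any_nil, Bool.or_false]
  have h6' : (decide (s = "blue") || decide (s = "denim") || decide (s = "denim blue") || decide (s = "blue denim")) = (["blue", "denim", "denim blue", "blue denim"] : List String).contains s := by
    simp [Bool.or_assoc]
  simp only [pvKeywords, hsingle, List.foldl_append]
  have t0 : pvCats.length ≤ 9 := by decide
  rw [pvGroup_fold' s ["black"] 0 _ t0]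
  have t1 := pvMinIf_le _ 0 (["black"].any (fun k => PySem.Str.isIn k s)) t0
  rw [pvGroup_fold' s ["white", "cream", "ivory", "off-white"] 1 _ t1]
  have t2 := pvMinIf_le _ 1 (["white", "cream", "ivory", "off-white"].any (fun k => PySem.Str.isIn k s)) t1
  rw [pvGroup_fold' s ["grey", "gray", "charcoal", "gunmetal", "steel"] 2 _ t2]
  have t3 := pvMinIf_le _ 2 (["grey", "gray", "charcoal", "gunmetal", "steel"].any (fun k => PySem.Str.isIn k s)) t2
  rw [pvGroup_fold' s ["dark", "indigo", "rinse", "deep", "midnight", "navy", "heritage"] 3 _ t3]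
  have t4 := pvMinIf_le _ 3 (["dark", "indigo", "rinse", "deep", "midnight", "navy", "heritage"].any (fun k => PySem.Str.isIn k s)) t3
  rw [pvGroup_fold' s ["light", "bleach", "faded", "acid"] 4 _ t4]
  have t5 := pvMinIf_le _ 4 (["light", "bleach", "faded", "acid"].any (fun k => PySem.Str.isIn k s)) t4
  rw [pvGroup_fold' s ["medium", "stonewash", "mid wash", "mid-wash"] 5 _ t5]
  have t6 := pvMinIf_le _ 5 (["medium", "stonewash", "mid wash", "mid-wash"].any (fun k => PySem.Str.isIn k s)) t5
  rw [pvGroup_fold' s ["brown", "chocolate", "toffee", "bourbon", "tan", "camel", "cognac", "coffee"] 7 _ t6]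
  have t7 := pvMinIf_le _ 7 (["brown", "chocolate", "toffee", "bourbon", "tan", "camel", "cognac", "coffee"].any (fun k => PySem.Str.isIn k s)) t6
  rw [pvGroup_fold' s ["khaki", "olive", "pine", "sage", "moss", "army", "camo", "sand", "stone", "natural"] 8 _ t7]
  rw [h0', h6']
  generalize (PySem.Str.isIn "black" s) = m0
  generalize (["white", "cream", "ivory", "off-white"].any (fun k => PySem.Str.isIn k s)) = m1
  generalize (["grey", "gray", "charcoal", "gunmetal", "steel"].any (fun k => PySem.Str.isIn k s)) = m2
  generalize (["dark", "indigo", "rinse", "deep", "midnight", "navy", "heritage"].any (fun k => PySem.Str.isIn k s)) = m3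
  generalize (["light", "bleach", "faded", "acid"].any (fun k => PySem.Str.isIn k s)) = m4
  generalize (["medium", "stonewash", "mid wash", "mid-wash"].any (fun k => PySem.Str.isIn k s)) = m5
  generalize ((["blue", "denim", "denim blue", "blue denim"] : List String).contains s) = m6
  generalize (["brown", "chocolate", "toffee", "bourbon", "tan", "camel", "cognac", "coffee"].any (fun k => PySem.Str.isIn k s)) = m7
  generalize (["khaki", "olive", "pine", "sage", "moss", "army", "camo", "sand", "stone", "natural"].any (fun k => PySem.Str.isIn k s)) = m8
  revert m0 m1 m2 m3 m4 m5 m6 m7 m8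
  decide

-- ===== VERDICT (by name: the statement is the Claim_ definition above) =====
theorem color_to_wash_category_spec : Claim_equal_color_to_wash_category := by
  intro color_str _
  unfold Spec_color_to_wash_category
  cases color_str with
  | none => rfl
  | some s0 =>
    show color_to_wash_category (some s0) = color_to_wash_category_alt (some s0)
    simp only [color_to_wash_category, color_to_wash_category_alt]
    rw [← pvMin_eq_chain]
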